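-- pv_equiv track=rewrite | github.com/huyfififi/coding-challenges | leetcode/721/step1_dfs.py | construct_email_to_alternatives
-- ===== SOURCE A (Python) =====
-- import collections
--
-- def construct_email_to_alternatives(
--     accounts: list[list[str]],
-- ) -> dict[str, set[str]]:
--     email_to_alternatives = collections.defaultdict(set)
--     for name_and_emails in accounts:
--         emails = name_and_emails[1:]
--         for email in emails:
--             for alternative in emails:
--                 if email == alternative:
--                     continue
--                 email_to_alternatives[email].add(alternative)
--     return email_to_alternatives
-- ===== SOURCE B (Python) =====
-- import collections
--
-- def construct_email_to_alternatives(
--     accounts: list[list[str]],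
-- ) -> dict[str, set[str]]:
--     email_to_alternatives = collections.defaultdict(set)
--     for name_and_emails in accounts:
--         seen: list[str] = []  # distinct emails of this account, in first-occurrence order
--         for email in name_and_emails[1:]:
--             for s in seen:
--                 if s != email:
--                     email_to_alternatives[s].add(email)
--             for s in seen:
--                 if s != email:
--                     email_to_alternatives[email].add(s)
--             if email not in seen:
--                 seen.append(email)
--     return email_to_alternatives
-- ===== Notes on version B (the rewrite author's own statement) =====
-- stated objective: alternative
-- what changed: replaces A's per-account full cross-product double loop (every email scanned against the whole email list) with a single incremental pass that maintains a growing 'seen' accumulator of distinct emails and links each email both ways with the emails seen before it, so each unordered pair is handled once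
import Mathlib
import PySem

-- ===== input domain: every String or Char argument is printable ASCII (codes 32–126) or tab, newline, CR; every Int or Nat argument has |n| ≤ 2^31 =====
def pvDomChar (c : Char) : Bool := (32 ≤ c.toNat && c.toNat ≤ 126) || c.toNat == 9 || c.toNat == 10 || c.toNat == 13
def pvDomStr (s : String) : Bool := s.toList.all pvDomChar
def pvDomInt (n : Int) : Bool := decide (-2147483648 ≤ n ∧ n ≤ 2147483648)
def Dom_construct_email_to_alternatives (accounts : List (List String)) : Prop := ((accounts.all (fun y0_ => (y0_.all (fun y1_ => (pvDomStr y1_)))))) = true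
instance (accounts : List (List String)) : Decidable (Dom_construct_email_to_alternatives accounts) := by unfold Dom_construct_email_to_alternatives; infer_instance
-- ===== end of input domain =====

-- B replaces A's per-account full cross-product double loop by a single incremental pass with a
-- growing 'seen' accumulator, pairing each new email with the emails seen before it (objective: alternative).


-- ===== PORT A =====
-- defaultdict(set): d[email].add(alt) = modify with default Set.empty
def construct_email_to_alternatives (accounts : List (List String)) : List (String × List String) :=
  (accounts.foldl (fun d name_and_emails =>
      let emails := PySem.List.slice name_and_emails (some 1) none
      emails.foldl (fun d email =>
        emails.foldl (fun d alternative =>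
          if email == alternative then d
          else d.modify email PySem.Set.empty (fun s => PySem.Set.add s alternative)) d) d)
    PySem.Dict.empty).items

-- ===== PORT B =====
-- B: one pass per account; each email is linked both ways with the distinct emails seen before it
def construct_email_to_alternatives_alt (accounts : List (List String)) : List (String × List String) :=
  (accounts.foldl (fun d name_and_emails =>
      ((PySem.List.slice name_and_emails (some 1) none).foldl
        (fun (p : PySem.Set String × PySem.Dict String (PySem.Set String)) email =>
          let d1 := p.1.foldl (fun d s =>
            if s == email then d else d.modify s PySem.Set.empty (fun t => PySem.Set.add t email)) p.2
          let d2 := p.1.foldl (fun d s =>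
            if s == email then d else d.modify email PySem.Set.empty (fun t => PySem.Set.add t s)) d1
          (PySem.Set.add p.1 email, d2))
        (PySem.Set.empty, d)).2)
    PySem.Dict.empty).items

-- ===== PRECONDITION & SPEC =====
def Spec_construct_email_to_alternatives (accounts : List (List String)) (out : List (String × List String)) : Prop := out = construct_email_to_alternatives_alt accounts
instance (accounts : List (List String)) (out : List (String × List String)) : Decidable (Spec_construct_email_to_alternatives accounts out) := by unfold Spec_construct_email_to_alternatives; infer_instance

-- ===== CLAIM (what is proved, stated in full; the proofs are below) =====
def Claim_equal_construct_email_to_alternatives : Prop := ∀ (accounts : List (List String)), Dom_construct_email_to_alternatives accounts → Spec_construct_email_to_alternatives accounts (construct_email_to_alternatives accounts)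

-- ===== LEMMAS AND PROOFS =====

-- A's inner scan: add the elements of l (except e itself) into e's set
def pvScanA (e : String) (l : List String) (d : PySem.Dict String (PySem.Set String)) : PySem.Dict String (PySem.Set String) :=
  l.foldl (fun d a => if e == a then d else d.modify e PySem.Set.empty (fun s => PySem.Set.add s a)) d

-- B's first scan: add e into the set of each previously seen email s ≠ e
def pvScanS (e : String) (l : List String) (d : PySem.Dict String (PySem.Set String)) : PySem.Dict String (PySem.Set String) :=
  l.foldl (fun d s => if s == e then d else d.modify s PySem.Set.empty (fun t => PySem.Set.add t e)) d

-- B's second scan: add each previously seen s ≠ e into e's set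
def pvScanT (e : String) (l : List String) (d : PySem.Dict String (PySem.Set String)) : PySem.Dict String (PySem.Set String) :=
  l.foldl (fun d s => if s == e then d else d.modify e PySem.Set.empty (fun t => PySem.Set.add t s)) d

-- A's per-account outer fold (inner list p fixed)
def pvFoldA (p q : List String) (d : PySem.Dict String (PySem.Set String)) : PySem.Dict String (PySem.Set String) :=
  q.foldl (fun d x => pvScanA x p d) d

-- B's per-account pair fold
def pvFoldB (q : List String) (sd : PySem.Set String × PySem.Dict String (PySem.Set String)) :
    PySem.Set String × PySem.Dict String (PySem.Set String) :=
  q.foldl (fun sd e => (PySem.Set.add sd.1 e, pvScanT e sd.1 (pvScanS e sd.1 sd.2))) sd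

-- the sequence of elements B adds into key k's set while processing q with seen-state S
def pvSeq (k : String) : List String → List String → List String
  | _, [] => []
  | S, e :: rest =>
      (if k = e then S.filter (fun s => !(s == k)) else if k ∈ S then [e] else []) ++
        pvSeq k (PySem.Set.add S e) rest

-- keys B's per-account step ultimately produces: nothing for ≤ 1 distinct email, else the distinct emails
def pvCform (q : List String) : List String :=
  match PySem.Set.ofList q with
  | [] => []
  | [_] => []
  | l => l

theorem pvUpdateCongr {s l1 l2 : List String} (h : PySem.Set.ofList l1 = PySem.Set.ofList l2) :
    PySem.Set.update s l1 = PySem.Set.update s l2 := by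
  rw [PySem.Set.update_eq_append_filter, PySem.Set.update_eq_append_filter, h]

theorem pvUpdateSubset {s l : List String} (h : ∀ x ∈ l, x ∈ s) : PySem.Set.update s l = s := by
  rw [PySem.Set.update_eq_append_filter]
  have : (PySem.Set.ofList l).filter (fun y => !PySem.Set.contains s y) = [] := by
    apply List.filter_eq_nil_iff.2
    intro a ha
    simp
    exact h a ((PySem.Set.mem_ofList _ _).1 ha)
  rw [this, List.append_nil]

theorem pvUpdateConst {l : List String} (s : List String) (x : String)
    (h : ∀ a ∈ l, a = x) (hne : l ≠ []) : PySem.Set.update s l = PySem.Set.add s x := by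
  induction l generalizing s with
  | nil => exact absurd rfl hne
  | cons a rest ih =>
      have ha : a = x := h a (List.mem_cons_self ..)
      subst ha
      rw [PySem.Set.update_cons]
      cases rest with
      | nil => rfl
      | cons b t =>
          rw [ih (PySem.Set.add s a) (fun y hy => h y (List.mem_cons_of_mem _ hy)) (by simp)]
          rw [PySem.Set.add_of_mem (PySem.Set.mem_add _ _ _ |>.2 (Or.inr rfl))]

theorem pvOfListEqNil {α : Type} [BEq α] [LawfulBEq α] (l : List α) :
    PySem.Set.ofList l = [] ↔ l = [] := by
  constructor
  · intro h
    cases l with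
    | nil => rfl
    | cons a l =>
        exfalso
        have : a ∈ PySem.Set.ofList (a :: l) := (PySem.Set.mem_ofList _ _).2 (List.mem_cons_self ..)
        rw [h] at this
        exact (List.not_mem_nil) this
  · intro h; rw [h]; rfl

theorem pvKeysModify (d : PySem.Dict String (PySem.Set String)) (k : String)
    (d0 : PySem.Set String) (f : PySem.Set String → PySem.Set String) :
    (d.modify k d0 f).keys = PySem.Set.add d.keys k := by
  rw [PySem.Dict.keys_modify]
  by_cases hc : d.contains k = true
  · rw [PySem.Dict.keys_insert_of_contains _ _ hc,
      PySem.Set.add_of_mem ((PySem.Dict.contains_iff_mem_keys _ _).1 hc)]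
  · have hk : k ∉ d.keys := fun hm => hc ((PySem.Dict.contains_iff_mem_keys _ _).2 hm)
    rw [PySem.Dict.keys_insert_of_not_contains _ _ (by simpa using hc),
      PySem.Set.add_of_not_mem hk]

-- ---- getD closed forms of the three scans ----

theorem pvGetD_scanA (e : String) (l : List String) :
    ∀ (d : PySem.Dict String (PySem.Set String)) (k : String),
      (pvScanA e l d).getD k PySem.Set.empty =
        if k = e then PySem.Set.update (d.getD e PySem.Set.empty) (l.filter (fun a => !(e == a)))
        else d.getD k PySem.Set.empty := by
  induction l with
  | nil => intro d k; by_cases h : k = e <;> simp [pvScanA, h]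
  | cons a rest ih =>
      intro d k
      by_cases ha : e = a
      · have t1 : pvScanA e (a :: rest) d = pvScanA e rest d := by simp [pvScanA, ha]
        rw [t1, ih, List.filter_cons_of_neg (by simp [ha])]
      · have t1 : pvScanA e (a :: rest) d
            = pvScanA e rest (d.modify e PySem.Set.empty (fun s => PySem.Set.add s a)) := by
          simp [pvScanA, ha]
        rw [t1, ih, List.filter_cons_of_pos (by simp [ha])]
        by_cases hk : k = e
        · subst hk
          rw [if_pos rfl, if_pos rfl, PySem.Dict.getD_modify_self, PySem.Set.update_cons]
        · rw [if_neg hk, if_neg hk, PySem.Dict.getD_modify_of_ne _ _ _ hk]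

theorem pvGetD_scanT (e : String) (l : List String) :
    ∀ (d : PySem.Dict String (PySem.Set String)) (k : String),
      (pvScanT e l d).getD k PySem.Set.empty =
        if k = e then PySem.Set.update (d.getD e PySem.Set.empty) (l.filter (fun s => !(s == e)))
        else d.getD k PySem.Set.empty := by
  induction l with
  | nil => intro d k; by_cases h : k = e <;> simp [pvScanT, h]
  | cons a rest ih =>
      intro d k
      by_cases ha : a = e
      · have t1 : pvScanT e (a :: rest) d = pvScanT e rest d := by simp [pvScanT, ha]
        rw [t1, ih, List.filter_cons_of_neg (by simp [ha])]
      · have t1 : pvScanT e (a :: rest) d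
            = pvScanT e rest (d.modify e PySem.Set.empty (fun t => PySem.Set.add t a)) := by
          simp [pvScanT, ha]
        rw [t1, ih, List.filter_cons_of_pos (by simp [ha])]
        by_cases hk : k = e
        · subst hk
          rw [if_pos rfl, if_pos rfl, PySem.Dict.getD_modify_self, PySem.Set.update_cons]
        · rw [if_neg hk, if_neg hk, PySem.Dict.getD_modify_of_ne _ _ _ hk]

theorem pvGetD_scanS (e : String) (l : List String) :
    ∀ (d : PySem.Dict String (PySem.Set String)) (k : String),
      (pvScanS e l d).getD k PySem.Set.empty =
        if k ∈ l ∧ k ≠ e then PySem.Set.add (d.getD k PySem.Set.empty) e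
        else d.getD k PySem.Set.empty := by
  induction l with
  | nil => intro d k; simp [pvScanS]
  | cons a rest ih =>
      intro d k
      by_cases ha : a = e
      · have t1 : pvScanS e (a :: rest) d = pvScanS e rest d := by simp [pvScanS, ha]
        rw [t1, ih]
        by_cases hc : k ∈ rest ∧ k ≠ e
        · rw [if_pos hc, if_pos ⟨List.mem_cons_of_mem _ hc.1, hc.2⟩]
        · rw [if_neg hc, if_neg (by
            rintro ⟨hm, hne⟩
            rcases List.mem_cons.1 hm with h | h
            · exact hne (h.trans ha)
            · exact hc ⟨h, hne⟩)]
      · have t1 : pvScanS e (a :: rest) d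
            = pvScanS e rest (d.modify a PySem.Set.empty (fun t => PySem.Set.add t e)) := by
          simp [pvScanS, ha]
        rw [t1, ih]
        by_cases hk : k = a
        · subst hk
          rw [PySem.Dict.getD_modify_self]
          by_cases hc : k ∈ rest ∧ k ≠ e
          · rw [if_pos hc, if_pos ⟨List.mem_cons_self .., ha⟩,
              PySem.Set.add_of_mem (PySem.Set.mem_add _ _ _ |>.2 (Or.inr rfl))]
          · rw [if_neg hc, if_pos ⟨List.mem_cons_self .., ha⟩]
        · rw [PySem.Dict.getD_modify_of_ne _ _ _ hk]
          by_cases hc : k ∈ rest ∧ k ≠ e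
          · rw [if_pos hc, if_pos ⟨List.mem_cons_of_mem _ hc.1, hc.2⟩]
          · rw [if_neg hc, if_neg (by
              rintro ⟨hm, hne⟩
              rcases List.mem_cons.1 hm with h | h
              · exact hk h
              · exact hc ⟨h, hne⟩)]

theorem pvKeys_scanA (e : String) (l : List String) :
    ∀ d : PySem.Dict String (PySem.Set String),
      (pvScanA e l d).keys =
        PySem.Set.update d.keys ((l.filter (fun a => !(e == a))).map (fun _ => e)) := by
  induction l with
  | nil => intro d; rfl
  | cons a rest ih =>
      intro d
      by_cases ha : e = a
      · have t1 : pvScanA e (a :: rest) d = pvScanA e rest d := by simp [pvScanA, ha]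
        rw [t1, ih, List.filter_cons_of_neg (by simp [ha])]
      · have t1 : pvScanA e (a :: rest) d
            = pvScanA e rest (d.modify e PySem.Set.empty (fun s => PySem.Set.add s a)) := by
          simp [pvScanA, ha]
        rw [t1, ih, pvKeysModify, List.filter_cons_of_pos (by simp [ha]), List.map_cons,
          PySem.Set.update_cons]

theorem pvKeys_scanT (e : String) (l : List String) :
    ∀ d : PySem.Dict String (PySem.Set String),
      (pvScanT e l d).keys =
        PySem.Set.update d.keys ((l.filter (fun s => !(s == e))).map (fun _ => e)) := by
  induction l with
  | nil => intro d; rfl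
  | cons a rest ih =>
      intro d
      by_cases ha : a = e
      · have t1 : pvScanT e (a :: rest) d = pvScanT e rest d := by simp [pvScanT, ha]
        rw [t1, ih, List.filter_cons_of_neg (by simp [ha])]
      · have t1 : pvScanT e (a :: rest) d
            = pvScanT e rest (d.modify e PySem.Set.empty (fun t => PySem.Set.add t a)) := by
          simp [pvScanT, ha]
        rw [t1, ih, pvKeysModify, List.filter_cons_of_pos (by simp [ha]), List.map_cons,
          PySem.Set.update_cons]

theorem pvKeys_scanS (e : String) (l : List String) :
    ∀ d : PySem.Dict String (PySem.Set String),
      (pvScanS e l d).keys = PySem.Set.update d.keys (l.filter (fun s => !(s == e))) := by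
  induction l with
  | nil => intro d; rfl
  | cons a rest ih =>
      intro d
      by_cases ha : a = e
      · have t1 : pvScanS e (a :: rest) d = pvScanS e rest d := by simp [pvScanS, ha]
        rw [t1, ih, List.filter_cons_of_neg (by simp [ha])]
      · have t1 : pvScanS e (a :: rest) d
            = pvScanS e rest (d.modify a PySem.Set.empty (fun t => PySem.Set.add t e)) := by
          simp [pvScanS, ha]
        rw [t1, ih, pvKeysModify, List.filter_cons_of_pos (by simp [ha]),
          PySem.Set.update_cons]

-- ---- closed forms for A's per-account fold ----

theorem pvA_getD (p : List String) (q : List String) :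
    ∀ (d : PySem.Dict String (PySem.Set String)) (k : String),
      (pvFoldA p q d).getD k PySem.Set.empty =
        if k ∈ q then
          PySem.Set.update (d.getD k PySem.Set.empty) (p.filter (fun a => !(k == a)))
        else d.getD k PySem.Set.empty := by
  induction q with
  | nil => intro d k; simp [pvFoldA]
  | cons x rest ih =>
      intro d k
      have hstep : pvFoldA p (x :: rest) d = pvFoldA p rest (pvScanA x p d) := rfl
      rw [hstep, ih, pvGetD_scanA]
      by_cases hk : k = x
      · subst hk
        by_cases hm : k ∈ rest
        · rw [if_pos hm, if_pos rfl, if_pos (List.mem_cons_self ..),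
            pvUpdateSubset (fun y hy => (PySem.Set.mem_update _ _ _).2 (Or.inr hy))]
        · rw [if_neg hm, if_pos rfl, if_pos (List.mem_cons_self ..)]
      · rw [if_neg hk]
        by_cases hm : k ∈ rest
        · rw [if_pos hm, if_pos (List.mem_cons_of_mem _ hm)]
        · rw [if_neg hm, if_neg (by
            intro h
            rcases List.mem_cons.1 h with h | h
            · exact hk h
            · exact hm h)]

theorem pvA_keys (p : List String) (q : List String) :
    ∀ d : PySem.Dict String (PySem.Set String),
      (pvFoldA p q d).keys =
        PySem.Set.update d.keys
          (q.filter (fun x => !((p.filter (fun a => !(x == a))).isEmpty))) := by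
  induction q using List.reverseRecOn with
  | nil => intro d; rfl
  | append_singleton q x ih =>
      intro d
      have hstep : pvFoldA p (q ++ [x]) d = pvScanA x p (pvFoldA p q d) := by
        simp [pvFoldA, List.foldl_append]
      rw [hstep, pvKeys_scanA, ih, List.filter_append, List.filter_cons]
      by_cases hemp : (p.filter (fun a => !(x == a))).isEmpty
      · rw [if_neg (by simp [hemp]), List.isEmpty_iff.1 hemp]
        simp
      · rw [if_pos (by simp [hemp])]
        have hnil : (p.filter (fun a => !(x == a))).map (fun _ => x) ≠ [] := by
          simp only [ne_eq, List.map_eq_nil_iff]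
          intro h; rw [h] at hemp; exact hemp rfl
        rw [pvUpdateConst _ x (fun a ha => by rcases List.mem_map.1 ha with ⟨b, _, hb⟩; exact hb.symm) hnil,
          PySem.Set.update_append]
        simp [PySem.Set.update_cons]
-- ---- closed forms for B's per-account fold ----

theorem pvGetD_foldB (k : String) (q : List String) :
    ∀ (S : PySem.Set String) (d : PySem.Dict String (PySem.Set String)),
      ((pvFoldB q (S, d)).2).getD k PySem.Set.empty =
        PySem.Set.update (d.getD k PySem.Set.empty) (pvSeq k S q) := by
  induction q with
  | nil => intro S d; rfl
  | cons e rest ih =>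
      intro S d
      have hstep : pvFoldB (e :: rest) (S, d)
          = pvFoldB rest (PySem.Set.add S e, pvScanT e S (pvScanS e S d)) := rfl
      rw [hstep, ih]
      show _ = PySem.Set.update _
        ((if k = e then S.filter (fun s => !(s == k)) else if k ∈ S then [e] else []) ++
          pvSeq k (PySem.Set.add S e) rest)
      rw [PySem.Set.update_append]
      congr 1
      rw [pvGetD_scanT]
      by_cases hk : k = e
      · subst hk
        rw [if_pos rfl, if_pos rfl, pvGetD_scanS, if_neg (by simp)]
      · rw [if_neg hk, if_neg hk, pvGetD_scanS]
        by_cases hm : k ∈ S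
        · rw [if_pos (show k ∈ S ∧ k ≠ e from ⟨hm, hk⟩), if_pos hm, PySem.Set.update_cons]
          rfl
        · rw [if_neg (show ¬(k ∈ S ∧ k ≠ e) from fun h => hm h.1), if_neg hm]
          rfl

-- deduplicated view of pvSeq when k has already been seen (context: the seen-part already recorded)
theorem pvSeq_ofList_mem (k : String) :
    ∀ (q S : List String), k ∈ S →
      PySem.Set.ofList (S.filter (fun s => !(s == k)) ++ pvSeq k S q) =
      PySem.Set.ofList (S.filter (fun s => !(s == k)) ++ q.filter (fun a => !(a == k))) := by
  intro q
  induction q with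
  | nil => intro S _; simp [pvSeq]
  | cons e rest ih =>
      intro S hS
      have habs : ∀ (m X : List String), (∀ x ∈ m, x ∈ S.filter (fun s => !(s == k))) →
          PySem.Set.ofList ((S.filter (fun s => !(s == k)) ++ m) ++ X)
            = PySem.Set.ofList (S.filter (fun s => !(s == k)) ++ X) := by
        intro m X hm
        rw [PySem.Set.ofList_append (xs := S.filter (fun s => !(s == k)) ++ m),
          PySem.Set.ofList_append (xs := S.filter (fun s => !(s == k))) (ys := m),
          pvUpdateSubset (fun x hx => (PySem.Set.mem_ofList _ _).2 (hm x hx)),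
          ← PySem.Set.ofList_append]
      by_cases hke : k = e
      · subst hke
        have hblock : pvSeq k S (k :: rest)
            = S.filter (fun s => !(s == k)) ++ pvSeq k (PySem.Set.add S k) rest := by
          simp [pvSeq]
        rw [hblock, PySem.Set.add_of_mem hS, List.filter_cons_of_neg (by simp),
          ← List.append_assoc, habs _ _ (fun x hx => hx)]
        exact ih S hS
      · have hblock : pvSeq k S (e :: rest) = [e] ++ pvSeq k (PySem.Set.add S e) rest := by
          simp [pvSeq, hke, hS]
        rw [hblock, List.filter_cons_of_pos (by simp [Ne.symm hke])]
        by_cases heS : e ∈ S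
        · have heF : e ∈ S.filter (fun s => !(s == k)) :=
            List.mem_filter.2 ⟨heS, by simp [Ne.symm hke]⟩
          have h1 : ∀ x ∈ [e], x ∈ S.filter (fun s => !(s == k)) := by
            intro x hx; rcases List.mem_singleton.1 hx with rfl; exact heF
          rw [PySem.Set.add_of_mem heS, ← List.append_assoc, habs _ _ h1, ih S hS,
            show S.filter (fun s => !(s == k)) ++ e :: rest.filter (fun a => !(a == k))
              = (S.filter (fun s => !(s == k)) ++ [e]) ++ rest.filter (fun a => !(a == k)) by simp,
            habs _ _ h1]
        · rw [PySem.Set.add_of_not_mem heS]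
          have hctx : (S ++ [e]).filter (fun s => !(s == k))
              = S.filter (fun s => !(s == k)) ++ [e] := by
            rw [List.filter_append]
            simp [Ne.symm hke]
          have hih := ih (S ++ [e]) (List.mem_append_left _ hS)
          rw [hctx] at hih
          rw [← List.append_assoc, hih, List.append_assoc]
          simp
-- fresh-k view of pvSeq: before k has been seen, only a first-k block and later singletons arise
theorem pvSeq_ofList (k : String) :
    ∀ (q S : List String), k ∉ S →
      PySem.Set.ofList (pvSeq k S q) =
        if k ∈ q then PySem.Set.ofList ((S ++ q).filter (fun a => !(a == k))) else [] := by
  intro q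
  induction q with
  | nil => intro S _; simp [pvSeq]
  | cons e rest ih =>
      intro S hS
      by_cases hke : k = e
      · subst hke
        have hblock : pvSeq k S (k :: rest)
            = S.filter (fun s => !(s == k)) ++ pvSeq k (PySem.Set.add S k) rest := by
          simp [pvSeq]
        rw [hblock, if_pos (List.mem_cons_self ..), PySem.Set.add_of_not_mem hS]
        have hctx : (S ++ [k]).filter (fun s => !(s == k)) = S.filter (fun s => !(s == k)) := by
          rw [List.filter_append]; simp
        have h2 := pvSeq_ofList_mem k rest (S ++ [k]) (List.mem_append_right _ (List.mem_singleton.2 rfl))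
        rw [hctx] at h2
        rw [h2, List.filter_append, List.filter_cons_of_neg (by simp)]
      · have hblock : pvSeq k S (e :: rest) = pvSeq k (PySem.Set.add S e) rest := by
          simp [pvSeq, hke, hS]
        have hkae : k ∉ PySem.Set.add S e := by
          intro h
          rcases (PySem.Set.mem_add _ _ _).1 h with h | h
          · exact hS h
          · exact hke h
        rw [hblock, ih (PySem.Set.add S e) hkae]
        have hmem : (k ∈ e :: rest) ↔ (k ∈ rest) := by
          constructor
          · intro h; rcases List.mem_cons.1 h with h | h
            · exact absurd h hke
            · exact h
          · exact List.mem_cons_of_mem _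
        by_cases hm : k ∈ rest
        · rw [if_pos hm, if_pos (hmem.2 hm)]
          by_cases heS : e ∈ S
          · rw [PySem.Set.add_of_mem heS]
            have hL : (S ++ rest).filter (fun a => !(a == k))
                = S.filter (fun a => !(a == k)) ++ rest.filter (fun a => !(a == k)) :=
              List.filter_append ..
            have hR : (S ++ e :: rest).filter (fun a => !(a == k))
                = S.filter (fun a => !(a == k)) ++ e :: rest.filter (fun a => !(a == k)) := by
              rw [List.filter_append, List.filter_cons_of_pos (by simp [Ne.symm hke])]
            rw [hL, hR]
            have heF : e ∈ S.filter (fun a => !(a == k)) :=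
              List.mem_filter.2 ⟨heS, by simp [Ne.symm hke]⟩
            rw [show S.filter (fun a => !(a == k)) ++ e :: rest.filter (fun a => !(a == k))
                = (S.filter (fun a => !(a == k)) ++ [e]) ++ rest.filter (fun a => !(a == k)) by simp]
            rw [PySem.Set.ofList_append (xs := S.filter (fun a => !(a == k)) ++ [e]),
              PySem.Set.ofList_append_singleton,
              PySem.Set.add_of_mem ((PySem.Set.mem_ofList _ _).2 heF),
              ← PySem.Set.ofList_append]
          · rw [PySem.Set.add_of_not_mem heS]
            rw [show (S ++ [e]) ++ rest = S ++ e :: rest by simp]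
        · rw [if_neg hm, if_neg (fun h => hm (hmem.1 h))]

-- the elements B ever adds into k's set over a whole account are exactly the other emails
theorem pvSeqChar (k : String) (p : List String) :
    PySem.Set.ofList (pvSeq k PySem.Set.empty p) =
      if k ∈ p then PySem.Set.ofList (p.filter (fun a => !(a == k))) else [] := by
  have h := pvSeq_ofList k p [] (by simp)
  have h2 : PySem.Set.ofList (pvSeq k [] p) =
      if k ∈ p then PySem.Set.ofList (p.filter (fun a => !(a == k))) else [] := by
    simpa using h
  exact h2

theorem pvFoldB_fst : ∀ (q : List String) (S : PySem.Set String)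
    (d : PySem.Dict String (PySem.Set String)), (pvFoldB q (S, d)).1 = PySem.Set.update S q := by
  intro q
  induction q with
  | nil => intro S d; rfl
  | cons e rest ih =>
      intro S d
      have hstep : pvFoldB (e :: rest) (S, d)
          = pvFoldB rest (PySem.Set.add S e, pvScanT e S (pvScanS e S d)) := rfl
      rw [hstep, ih, PySem.Set.update_cons]

theorem pvCform_eq (r : List String) (v w : String) (u : List String)
    (h : PySem.Set.ofList r = v :: w :: u) : pvCform r = v :: w :: u := by
  unfold pvCform
  rw [h]

theorem pvCform_one (r : List String) (v : String)
    (h : PySem.Set.ofList r = [v]) : pvCform r = [] := by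
  unfold pvCform
  rw [h]
theorem pvB_keys (q : List String) :
    ∀ d : PySem.Dict String (PySem.Set String),
      ((pvFoldB q (PySem.Set.empty, d)).2).keys = PySem.Set.update d.keys (pvCform q) := by
  induction q using List.reverseRecOn with
  | nil => intro d; rfl
  | append_singleton q e ih =>
      intro d
      have hstep : (pvFoldB (q ++ [e]) (PySem.Set.empty, d)).2
          = pvScanT e (pvFoldB q (PySem.Set.empty, d)).1
              (pvScanS e (pvFoldB q (PySem.Set.empty, d)).1 (pvFoldB q (PySem.Set.empty, d)).2) := by
        simp [pvFoldB, List.foldl_append]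
      have hfst : (pvFoldB q (PySem.Set.empty, d)).1 = PySem.Set.ofList q := by
        rw [pvFoldB_fst]; rfl
      rw [hstep, hfst, pvKeys_scanT, pvKeys_scanS, ih]
      cases hS : PySem.Set.ofList q with
      | nil =>
          have hq : q = [] := (pvOfListEqNil q).1 hS
          subst hq
          rfl
      | cons v t =>
          cases t with
          | nil =>
              by_cases hve : v = e
              · have hf : [v].filter (fun s => !(s == e)) = [] := by simp [hve]
                rw [hf]
                have hcq : pvCform q = [] := pvCform_one q v hS
                have hce : pvCform (q ++ [e]) = [] :=
                  pvCform_one _ v (by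
                    rw [PySem.Set.ofList_append_singleton, hS, hve,
                      PySem.Set.add_of_mem (List.mem_singleton.2 rfl), ← hve])
                rw [hcq, hce]
                rfl
              · have hf : [v].filter (fun s => !(s == e)) = [v] := by simp [hve]
                rw [hf]
                have hcq : pvCform q = [] := pvCform_one q v hS
                have hce : pvCform (q ++ [e]) = [v, e] := by
                  apply pvCform_eq
                  rw [PySem.Set.ofList_append_singleton, hS, PySem.Set.add_of_not_mem (by simp [Ne.symm hve])]
                  rfl
                rw [hcq, hce]
                rw [show ([v].map (fun _ => e)) = [e] from rfl]
                rw [show ([v, e] : List String) = [v] ++ [e] from rfl, PySem.Set.update_append]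
                rfl
          | cons w u =>
              have hnd : (v :: w :: u).Nodup := hS ▸ PySem.Set.nodup_ofList q
              have hvw : v ≠ w := by
                intro h
                exact (List.nodup_cons.1 hnd).1 (h ▸ List.mem_cons_self ..)
              have hcq : pvCform q = v :: w :: u := pvCform_eq q v w u hS
              have hz : ∃ z ∈ (v :: w :: u : List String), z ≠ e := by
                by_cases hv : v = e
                · exact ⟨w, List.mem_cons_of_mem _ (List.mem_cons_self ..), fun h => hvw (hv ▸ h ▸ rfl)⟩
                · exact ⟨v, List.mem_cons_self .., hv⟩
              rcases hz with ⟨z, hzm, hze⟩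
              have hzf : z ∈ (v :: w :: u).filter (fun s => !(s == e)) :=
                List.mem_filter.2 ⟨hzm, by simp [hze]⟩
              have hfne : (v :: w :: u).filter (fun s => !(s == e)) ≠ [] :=
                List.ne_nil_of_mem hzf
              have hmapne : ((v :: w :: u).filter (fun s => !(s == e))).map (fun _ => e) ≠ [] := by
                simpa using hfne
              rw [hcq]
              rw [pvUpdateSubset (s := PySem.Set.update d.keys (v :: w :: u))
                (fun x hx => (PySem.Set.mem_update _ _ _).2 (Or.inr (List.mem_filter.1 hx).1))]
              rw [pvUpdateConst _ e (fun a ha => by rcases List.mem_map.1 ha with ⟨b, _, hb⟩; exact hb.symm) hmapne]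
              have hce : pvCform (q ++ [e]) = PySem.Set.add (v :: w :: u) e := by
                have : PySem.Set.ofList (q ++ [e]) = PySem.Set.add (v :: w :: u) e := by
                  rw [PySem.Set.ofList_append_singleton, hS]
                by_cases he : e ∈ (v :: w :: u : List String)
                · rw [PySem.Set.add_of_mem he] at this ⊢
                  exact pvCform_eq _ _ _ _ this
                · rw [PySem.Set.add_of_not_mem he] at this ⊢
                  exact pvCform_eq _ _ _ _ this
              rw [hce]
              by_cases he : e ∈ (v :: w :: u : List String)
              · rw [PySem.Set.add_of_mem he,
                  PySem.Set.add_of_mem ((PySem.Set.mem_update _ _ _).2 (Or.inr he))]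
              · rw [PySem.Set.add_of_not_mem he]
                rw [PySem.Set.update_append]
                rw [show PySem.Set.update (PySem.Set.update d.keys (v :: w :: u)) [e]
                    = PySem.Set.add (PySem.Set.update d.keys (v :: w :: u)) e from rfl]
-- A's qualifying emails (those with a distinct partner) deduplicate to the same keys B creates
theorem pvPredChar (p : List String) :
    PySem.Set.ofList (p.filter (fun x => !((p.filter (fun a => !(x == a))).isEmpty)))
      = PySem.Set.ofList (pvCform p) := by
  cases hS : PySem.Set.ofList p with
  | nil =>
      have hp : p = [] := (pvOfListEqNil p).1 hS
      subst hp
      rfl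
  | cons v t =>
      cases t with
      | nil =>
          have hall : ∀ x ∈ p, x = v := by
            intro x hx
            have : x ∈ PySem.Set.ofList p := (PySem.Set.mem_ofList _ _).2 hx
            rw [hS] at this
            exact List.mem_singleton.1 this
          have hf : p.filter (fun x => !((p.filter (fun a => !(x == a))).isEmpty)) = [] := by
            apply List.filter_eq_nil_iff.2
            intro x hx
            have hx' : x = v := hall x hx
            have : p.filter (fun a => !(x == a)) = [] := by
              apply List.filter_eq_nil_iff.2
              intro a ha
              simp [hx', hall a ha]
            simp [this]
          rw [hf, pvCform_one p v hS]
      | cons w u =>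
          have hnd : (v :: w :: u).Nodup := hS ▸ PySem.Set.nodup_ofList p
          have hvw : v ≠ w := by
            intro h
            exact (List.nodup_cons.1 hnd).1 (h ▸ List.mem_cons_self ..)
          have hvp : v ∈ p := (PySem.Set.mem_ofList _ _).1 (hS ▸ List.mem_cons_self ..)
          have hwp : w ∈ p :=
            (PySem.Set.mem_ofList _ _).1 (hS ▸ List.mem_cons_of_mem _ (List.mem_cons_self ..))
          have hf : p.filter (fun x => !((p.filter (fun a => !(x == a))).isEmpty)) = p := by
            apply List.filter_eq_self.2
            intro x hx
            have hz : ∃ z ∈ p, z ≠ x := by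
              by_cases hv : v = x
              · exact ⟨w, hwp, fun h => hvw (hv ▸ h ▸ rfl)⟩
              · exact ⟨v, hvp, hv⟩
            rcases hz with ⟨z, hzp, hzx⟩
            have : z ∈ p.filter (fun a => !(x == a)) :=
              List.mem_filter.2 ⟨hzp, by simp [Ne.symm hzx]⟩
            simp [List.ne_nil_of_mem this]
          rw [hf, pvCform_eq p v w u hS, ← hS, PySem.Set.ofList_ofList]

-- per-account step of A = per-account step of B (dicts with unique keys)
theorem pvAccount_eq (p : List String) (d : PySem.Dict String (PySem.Set String))
    (hnd : d.keys.Nodup) : pvFoldA p p d = (pvFoldB p (PySem.Set.empty, d)).2 := by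
  have hkA := pvA_keys p p d
  have hkB := pvB_keys p d
  have hkeys : (pvFoldA p p d).keys = ((pvFoldB p (PySem.Set.empty, d)).2).keys := by
    rw [hkA, hkB]
    exact pvUpdateCongr (pvPredChar p)
  have hndA : (pvFoldA p p d).keys.Nodup := by
    rw [hkA]; exact PySem.Set.nodup_update _ _ hnd
  have hndB : ((pvFoldB p (PySem.Set.empty, d)).2).keys.Nodup := by
    rw [hkB]; exact PySem.Set.nodup_update _ _ hnd
  have hget : ∀ k, (pvFoldA p p d).getD k PySem.Set.empty
      = ((pvFoldB p (PySem.Set.empty, d)).2).getD k PySem.Set.empty := by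
    intro k
    rw [pvA_getD, pvGetD_foldB]
    by_cases hm : k ∈ p
    · rw [if_pos hm]
      apply pvUpdateCongr
      rw [pvSeqChar, if_pos hm]
      have hfe : p.filter (fun a => !(k == a)) = p.filter (fun a => !(a == k)) := by
        apply List.filter_congr
        intro a _
        rw [Bool.beq_comm]
      rw [hfe]
    · rw [if_neg hm]
      have hnil : pvSeq k PySem.Set.empty p = [] := by
        apply (pvOfListEqNil _).1
        rw [pvSeqChar, if_neg hm]
      rw [hnil]
      rfl
  apply PySem.Dict.ext
  rw [PySem.Dict.items_eq_map_keys _ hndA PySem.Set.empty,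
    PySem.Dict.items_eq_map_keys _ hndB PySem.Set.empty, ← hkeys]
  apply List.map_congr_left
  intro k _
  rw [hget k]

-- whole-program fold: accounts processed one after the other, unique keys preserved throughout
theorem pvTop : ∀ (accounts : List (List String)) (d : PySem.Dict String (PySem.Set String)),
    d.keys.Nodup →
    accounts.foldl (fun d nae =>
        pvFoldA (PySem.List.slice nae (some 1) none) (PySem.List.slice nae (some 1) none) d) d
      = accounts.foldl (fun d nae =>
        (pvFoldB (PySem.List.slice nae (some 1) none) (PySem.Set.empty, d)).2) d := by
  intro accounts
  induction accounts with
  | nil => intro d _; rfl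
  | cons nae rest ih =>
      intro d hnd
      show rest.foldl _ (pvFoldA _ _ d) = rest.foldl _ ((pvFoldB _ (PySem.Set.empty, d)).2)
      rw [pvAccount_eq _ d hnd]
      exact ih _ (by rw [pvB_keys]; exact PySem.Set.nodup_update _ _ hnd)

-- ===== VERDICT (by name: the statement is the Claim_ definition above) =====
theorem construct_email_to_alternatives_spec : Claim_equal_construct_email_to_alternatives := by
  intro accounts _
  show construct_email_to_alternatives accounts = construct_email_to_alternatives_alt accounts
  unfold construct_email_to_alternatives construct_email_to_alternatives_alt
  have h := pvTop accounts PySem.Dict.empty PySem.Dict.nodup_keys_empty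
  exact congrArg PySem.Dict.items h
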